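-- pv_equiv track=rewrite | github.com/adobe/Marinus | python3_cron_scripts/get_crt_sh.py | get_cert_zones
-- ===== SOURCE A (Python) =====
-- def get_cert_zones(cert, zones):
--     """
--     Find the relevant certificate zones
--     """
--     cert_zones = []
--
--     if "subject_common_names" in cert:
--         for cn in cert["subject_common_names"]:
--             for zone in zones:
--                 if cn == zone or cn.endswith("." + zone):
--                     if zone not in cert_zones:
--                         cert_zones.append(zone)
--
--     if "subject_dns_names" in cert:
--         for cn in cert["subject_dns_names"]:
--             for zone in zones:
--                 if cn == zone or cn.endswith("." + zone):
--                     if zone not in cert_zones: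
--                         cert_zones.append(zone)
--
--     return cert_zones
-- ===== SOURCE B (Python) =====
-- def get_cert_zones(cert, zones):
--     """
--     Find the relevant certificate zones.
--
--     Instead of testing every (name, zone) pair, index the zones by their
--     first position once, generate each name's dot-suffixes, and look those
--     up; matches are emitted in zone order via a sort of the hit indices.
--     """
--     zidx = {}
--     for i, z in enumerate(zones):
--         if z not in zidx:
--             zidx[z] = i
--
--     names = cert.get("subject_common_names", []) + cert.get("subject_dns_names", [])
--
--     cert_zones = []
--     for cn in names:
--         cands = [cn] + [cn[k + 1:] for k, ch in enumerate(cn) if ch == '.']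
--         hits = sorted(zidx[c] for c in cands if c in zidx)
--         for j in hits:
--             z = zones[j]
--             if z not in cert_zones:
--                 cert_zones.append(z)
--     return cert_zones
-- ===== Notes on version B (the rewrite author's own statement) =====
-- stated objective: alternative
-- what changed: Instead of comparing every certificate name against every zone with endswith, B indexes the zones by first position in a dict once, generates each name's dot-suffixes and looks them up, then sorts the hit indices to emit matches in zone order.
import Mathlib
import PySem

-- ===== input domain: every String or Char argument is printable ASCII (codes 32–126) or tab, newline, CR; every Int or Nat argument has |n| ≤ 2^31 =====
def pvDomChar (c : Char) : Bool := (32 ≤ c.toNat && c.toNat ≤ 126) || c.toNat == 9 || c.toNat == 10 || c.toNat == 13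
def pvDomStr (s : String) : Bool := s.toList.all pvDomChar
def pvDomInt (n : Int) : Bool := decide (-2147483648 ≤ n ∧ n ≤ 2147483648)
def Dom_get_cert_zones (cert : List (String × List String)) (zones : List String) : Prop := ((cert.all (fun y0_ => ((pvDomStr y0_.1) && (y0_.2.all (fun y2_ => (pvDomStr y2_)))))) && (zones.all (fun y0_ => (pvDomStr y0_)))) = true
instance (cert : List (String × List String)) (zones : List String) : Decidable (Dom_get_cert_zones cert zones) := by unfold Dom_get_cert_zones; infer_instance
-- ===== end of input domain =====

-- B replaces A's per-name scan of all zones by a zone→first-index dict probed with each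
-- name's dot-suffixes, sorting the hit indices (objective: alternative).

-- ===== PORT A =====
-- 'cn == zone or cn.endswith("." + zone)'; "." + zone is built as String.ofList ('.' :: zone.toList),
-- exact Python string concatenation on the code points.
def pvMatchA (cn zone : String) : Bool :=
  cn == zone || PySem.Str.endswith cn (String.ofList ('.' :: zone.toList))

def get_cert_zones (cert : List (String × List String)) (zones : List String) : List String :=
  let cert_zones : List String := []
  -- if "subject_common_names" in cert: for cn in ...: for zone in zones: ...
  let cert_zones :=
    match cert.lookup "subject_common_names" with
    | some cns =>
        cns.foldl (fun acc cn =>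
          zones.foldl (fun acc zone =>
            if pvMatchA cn zone && !acc.contains zone then acc ++ [zone] else acc) acc) cert_zones
    | none => cert_zones
  -- if "subject_dns_names" in cert: (the same loop again)
  match cert.lookup "subject_dns_names" with
  | some cns =>
      cns.foldl (fun acc cn =>
        zones.foldl (fun acc zone =>
          if pvMatchA cn zone && !acc.contains zone then acc ++ [zone] else acc) acc) cert_zones
  | none => cert_zones

-- ===== PORT B =====
-- [cn[k+1:] for k, ch in enumerate(cn) if ch == '.'] as a structural recursion over the characters
def pvDotSuffixes : List Char → List (List Char)
  | [] => []
  | c :: rest => if c = '.' then rest :: pvDotSuffixes rest else pvDotSuffixes rest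

-- cands = [cn] + [cn[k+1:] for k, ch in enumerate(cn) if ch == '.']
def pvCands (cn : String) : List String :=
  cn :: (pvDotSuffixes cn.toList).map String.ofList

-- for i, z in enumerate(zones): if z not in zidx: zidx[z] = i
def pvZoneIndex (zones : List String) : PySem.Dict String Int :=
  (PySem.List.enumerate zones).foldl
    (fun d p => if d.contains p.2 then d else d.insert p.2 p.1) PySem.Dict.empty

-- one step of the comprehension 'zidx[c] for c in cands if c in zidx'
def pvAppendHit (zidx : PySem.Dict String Int) (h : List Int) (c : String) : List Int :=
  match zidx.get? c with | some j => h ++ [j] | none => h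

def get_cert_zones_alt (cert : List (String × List String)) (zones : List String) : List String :=
  let zidx := pvZoneIndex zones
  let names := ((cert.lookup "subject_common_names").getD []) ++
               ((cert.lookup "subject_dns_names").getD [])
  names.foldl (fun cert_zones cn =>
    -- hits = sorted(zidx[c] for c in cands if c in zidx)
    let hits := (pvCands cn).foldl (pvAppendHit zidx) []
    (PySem.List.sorted hits (fun j => j)).foldl (fun cert_zones j =>
      let z := PySem.List.pyGetD zones j ""   -- zones[j]; every hit is a valid index
      if !cert_zones.contains z then cert_zones ++ [z] else cert_zones) cert_zones) []

-- ===== PRECONDITION & SPEC =====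
def Spec_get_cert_zones (cert : List (String × List String)) (zones : List String) (out : List String) : Prop := out = get_cert_zones_alt cert zones
instance (cert : List (String × List String)) (zones : List String) (out : List String) : Decidable (Spec_get_cert_zones cert zones out) := by unfold Spec_get_cert_zones; infer_instance

-- ===== CLAIM (what is proved, stated in full; the proofs are below) =====
def Claim_equal_get_cert_zones : Prop := ∀ (cert : List (String × List String)) (zones : List String), Dom_get_cert_zones cert zones → Spec_get_cert_zones cert zones (get_cert_zones cert zones)

-- ===== LEMMAS AND PROOFS =====

-- the natural-index list of first occurrences of candidate zones, in increasing order
def pvFIdx (cn : String) (zones : List String) : List Int :=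
  ((List.range zones.length).filter (fun j =>
      decide (List.idxOf? (zones.getD j "") zones = some j) &&
      decide (zones.getD j "" ∈ pvCands cn))).map Int.ofNat

lemma pv_mem_dotSuffixes (cs l : List Char) : l ∈ pvDotSuffixes cs ↔ ('.' :: l) <:+ cs := by
  induction cs with
  | nil => simp [pvDotSuffixes]
  | cons c rest ih =>
    by_cases hc : c = '.'
    · subst hc
      simp [pvDotSuffixes, ih, List.suffix_cons_iff]
    · simp only [pvDotSuffixes, if_neg hc, ih, List.suffix_cons_iff]
      constructor
      · exact Or.inr
      · rintro (h | h)
        · exact absurd (by injection h with h1 _; exact h1.symm) hc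
        · exact h
lemma pv_dotSuffixes_len {cs l : List Char} (h : l ∈ pvDotSuffixes cs) : l.length < cs.length := by
  have := ((pv_mem_dotSuffixes cs l).mp h).length_le
  simpa using this

lemma pv_dotSuffixes_nodup (cs : List Char) : (pvDotSuffixes cs).Nodup := by
  induction cs with
  | nil => simp [pvDotSuffixes]
  | cons c rest ih =>
    by_cases hc : c = '.'
    · subst hc
      have h1 : pvDotSuffixes ('.' :: rest) = rest :: pvDotSuffixes rest := by
        simp [pvDotSuffixes]
      rw [h1, List.nodup_cons]
      exact ⟨fun h => absurd (pv_dotSuffixes_len h) (lt_irrefl _), ih⟩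
    · simpa [pvDotSuffixes, hc] using ih
lemma pv_cands_nodup (cn : String) : (pvCands cn).Nodup := by
  unfold pvCands
  refine List.nodup_cons.mpr ⟨?_, ?_⟩
  · intro h
    obtain ⟨l, hl, he⟩ := List.mem_map.mp h
    have : l.length < cn.toList.length := pv_dotSuffixes_len hl
    rw [← he, String.toList_ofList] at this
    exact absurd this (lt_irrefl _)
  · exact (pv_dotSuffixes_nodup _).map (fun a b h => by
      have := congrArg String.toList h
      rwa [String.toList_ofList, String.toList_ofList] at this)
lemma pv_mem_cands (cn z : String) : z ∈ pvCands cn ↔ pvMatchA cn z = true := by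
  unfold pvCands pvMatchA
  simp only [PySem.Str.endswith_eq, String.toList_ofList, PySem.Chars.endswith_iff,
    Bool.or_eq_true, beq_iff_eq, List.mem_cons, List.mem_map]
  constructor
  · rintro (rfl | ⟨l, hl, rfl⟩)
    · exact Or.inl rfl
    · exact Or.inr (by rw [String.toList_ofList]; exact (pv_mem_dotSuffixes _ _).mp hl)
  · rintro (rfl | h)
    · exact Or.inl rfl
    · exact Or.inr ⟨z.toList, (pv_mem_dotSuffixes _ _).mpr h, String.toList_injective (String.toList_ofList)⟩
lemma pv_idxOf?_append {c : String} (zs ys : List String) (h : c ∈ zs) :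
    List.idxOf? c (zs ++ ys) = List.idxOf? c zs := by
  induction zs with
  | nil => exact absurd h (List.not_mem_nil)
  | cons a zs ih =>
    by_cases ha : a = c
    · simp [List.idxOf?_cons, ha]
    · have : c ∈ zs := by
        rcases List.mem_cons.mp h with h' | h'
        · exact absurd h'.symm ha
        · exact h'
      simp [List.idxOf?_cons, ha, ih this]

lemma pv_build (xs : List String) : ∀ (s : Int) (d : PySem.Dict String Int) (c : String),
    ((PySem.List.enumerate xs s).foldl
        (fun d p => if d.contains p.2 then d else d.insert p.2 p.1) d).get? c
      = match d.get? c with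
        | some v => some v
        | none => (List.idxOf? c xs).map (fun n => s + (n : Int)) := by
  induction xs with
  | nil =>
    intro s d c
    cases h : d.get? c <;> simp [PySem.List.enumerate, h]
  | cons x xs ih =>
    intro s d c
    have henum : PySem.List.enumerate (x :: xs) s = (s, x) :: PySem.List.enumerate xs (s + 1) := rfl
    rw [henum, List.foldl_cons]
    by_cases hx : d.contains x = true
    · simp only [hx, if_true, ih (s+1) d c]
      cases h : d.get? c with
      | some v => simp
      | none =>
        have hxc : x ≠ c := by
          intro he; subst he
          rw [PySem.Dict.contains_eq_isSome_get?, h] at hx; simp at hx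
        rw [List.idxOf?_cons, if_neg (by simpa using hxc)]
        cases hi : List.idxOf? c xs <;> simp <;> omega
    · simp only [hx, Bool.false_eq_true, if_false, ih (s+1) (d.insert x s) c]
      by_cases hc : c = x
      · subst hc
        rw [PySem.Dict.get?_insert_self]
        have h : d.get? c = none := by
          rw [PySem.Dict.contains_eq_isSome_get?] at hx
          cases h : d.get? c <;> simp [h] at hx ⊢
        simp [h, List.idxOf?_cons]
      · rw [PySem.Dict.get?_insert_of_ne _ _ hc]
        cases h : d.get? c with
        | some v => simp
        | none =>
          have : ¬ (x = c) := fun he => hc he.symm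
          rw [List.idxOf?_cons, if_neg (by simpa using this)]
          cases hi : List.idxOf? c xs <;> simp <;> omega

lemma pv_zoneIndex_get? (zones : List String) (c : String) :
    (pvZoneIndex zones).get? c = (List.idxOf? c zones).map Int.ofNat := by
  rw [pvZoneIndex, pv_build zones 0 PySem.Dict.empty c]
  rw [PySem.Dict.get?_empty]
  cases List.idxOf? c zones <;> simp [Int.ofNat_eq_natCast]
lemma pv_foldl_filterMap (zidx : PySem.Dict String Int) (l : List String) (acc : List Int) :
    l.foldl (pvAppendHit zidx) acc = acc ++ l.filterMap (fun c => zidx.get? c) := by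
  induction l generalizing acc with
  | nil => simp
  | cons c l ih =>
    cases hc : zidx.get? c with
    | some j => simp [pvAppendHit, hc, ih]
    | none => simp [pvAppendHit, hc, ih]

lemma pv_hits_nodup (cn : String) (zones : List String) :
    ((pvCands cn).filterMap (fun c => (pvZoneIndex zones).get? c)).Nodup := by
  apply List.Nodup.filterMap _ (pv_cands_nodup cn)
  intro a a' b hb hb'
  rw [Option.mem_def, pv_zoneIndex_get?] at hb hb'
  obtain ⟨i, hi, hcast⟩ := Option.map_eq_some_iff.mp hb
  obtain ⟨i', hi', hcast'⟩ := Option.map_eq_some_iff.mp hb'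
  obtain ⟨hlt, hget, -⟩ := List.idxOf?_eq_some_iff.mp hi
  obtain ⟨hlt', hget', -⟩ := List.idxOf?_eq_some_iff.mp hi'
  have : i = i' := by
    rw [← hcast', Int.ofNat_eq_natCast, Int.ofNat_eq_natCast] at hcast
    exact_mod_cast hcast
  subst this
  rw [← hget, ← hget']

lemma pv_FIdx_nodup (cn : String) (zones : List String) : (pvFIdx cn zones).Nodup := by
  unfold pvFIdx
  exact List.Nodup.map (fun a b h => by
      rw [Int.ofNat_eq_natCast, Int.ofNat_eq_natCast] at h; exact_mod_cast h)
    (List.Nodup.filter _ List.nodup_range)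

lemma pv_FIdx_pairwise (cn : String) (zones : List String) :
    (pvFIdx cn zones).Pairwise (fun a b : Int => a < b) := by
  unfold pvFIdx
  exact List.Pairwise.map _ (fun a b h => by
      rw [Int.ofNat_eq_natCast, Int.ofNat_eq_natCast]; exact_mod_cast h)
    (List.Pairwise.sublist (List.filter_sublist) List.pairwise_lt_range)

lemma pv_mem_hits (cn : String) (zones : List String) (x : Int) :
    x ∈ (pvCands cn).filterMap (fun c => (pvZoneIndex zones).get? c) ↔ x ∈ pvFIdx cn zones := by
  rw [List.mem_filterMap]
  unfold pvFIdx
  simp only [List.mem_map, List.mem_filter, List.mem_range, Bool.and_eq_true, decide_eq_true_eq]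
  constructor
  · rintro ⟨c, hc, hget⟩
    rw [pv_zoneIndex_get?] at hget
    obtain ⟨i, hi, hcast⟩ := Option.map_eq_some_iff.mp hget
    obtain ⟨hlt, hget2, -⟩ := List.idxOf?_eq_some_iff.mp hi
    refine ⟨i, ⟨hlt, ?_, ?_⟩, hcast⟩
    · rw [List.getD_eq_getElem _ _ hlt, hget2]; exact hi
    · rw [List.getD_eq_getElem _ _ hlt, hget2]; exact hc
  · rintro ⟨j, ⟨hj, hfirst, hcand⟩, rfl⟩
    exact ⟨zones.getD j "", hcand, by rw [pv_zoneIndex_get?, hfirst]; rfl⟩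

lemma pv_sorted_hits (cn : String) (zones : List String) :
    PySem.List.sorted ((pvCands cn).filterMap (fun c => (pvZoneIndex zones).get? c)) (fun j => j)
      = pvFIdx cn zones := by
  exact PySem.List.sorted_eq_of_perm_of_pairwise_lt _ _ _
    ((List.perm_ext_iff_of_nodup (pv_FIdx_nodup cn zones) (pv_hits_nodup cn zones)).mpr
      (fun a => (pv_mem_hits cn zones a).symm))
    (pv_FIdx_pairwise cn zones)

lemma pv_first_map_dedup (zones : List String) :
    ((List.range zones.length).filter (fun j =>
        decide (List.idxOf? (zones.getD j "") zones = some j))).map (fun j => zones.getD j "")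
      = PySem.List.dedup zones := by
  induction zones using List.reverseRecOn with
  | nil => simp [PySem.List.dedup]
  | append_singleton zs x ih =>
    have hlen : (zs ++ [x]).length = zs.length + 1 := by simp
    rw [hlen, List.range_succ, List.filter_append, List.map_append]
    have hpref : ∀ j < zs.length, (zs ++ [x]).getD j "" = zs.getD j "" := fun j hj =>
      List.getD_append _ _ _ _ hj
    have hfilter :
        (List.range zs.length).filter (fun j =>
            decide (List.idxOf? ((zs ++ [x]).getD j "") (zs ++ [x]) = some j))
          = (List.range zs.length).filter (fun j =>
            decide (List.idxOf? (zs.getD j "") zs = some j)) := by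
      apply List.filter_congr
      intro j hj
      have hj' : j < zs.length := List.mem_range.mp hj
      have hc : zs.getD j "" ∈ zs := by
        rw [List.getD_eq_getElem _ _ hj']; exact List.getElem_mem _
      rw [hpref j hj', pv_idxOf?_append zs [x] hc]
    have hmappref :
        (((List.range zs.length).filter (fun j =>
            decide (List.idxOf? (zs.getD j "") zs = some j)))).map (fun j => (zs ++ [x]).getD j "")
          = (((List.range zs.length).filter (fun j =>
            decide (List.idxOf? (zs.getD j "") zs = some j)))).map (fun j => zs.getD j "") := by
      apply List.map_congr_left
      intro j hj
      exact hpref j (List.mem_range.mp (List.mem_of_mem_filter hj))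
    rw [hfilter, hmappref, ih]
    have hgetx : (zs ++ [x]).getD zs.length "" = x := by
      rw [List.getD_eq_getElem _ _ (by simp)]
      exact List.getElem_concat_length rfl _
    rw [PySem.List.dedup_eq_ofList (zs ++ [x]), PySem.Set.ofList_append_singleton,
      PySem.Set.add_eq_ite, ← PySem.List.dedup_eq_ofList]
    have hgetx2 : (zs ++ [x])[zs.length]? = some x := by simp
    by_cases hx : x ∈ zs
    · have hmem : x ∈ PySem.List.dedup zs := (PySem.List.mem_dedup _ _).mpr hx
      rw [if_pos hmem]
      have hk : ∃ k, List.idxOf? x zs = some k := by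
        cases h : List.idxOf? x zs with
        | some k => exact ⟨k, rfl⟩
        | none => exact absurd (List.idxOf?_eq_none_iff.mp h) (by simpa using hx)
      obtain ⟨k, hk⟩ := hk
      have hklt : k < zs.length := (List.idxOf?_eq_some_iff.mp hk).1
      have hpred : List.idxOf? x (zs ++ [x]) ≠ some zs.length := by
        rw [pv_idxOf?_append zs [x] hx, hk]
        intro h
        exact absurd (Option.some.inj h) (Nat.ne_of_lt hklt)
      simp [hpred]
    · have hmem : x ∉ PySem.List.dedup zs := fun h => hx ((PySem.List.mem_dedup _ _).mp h)
      rw [if_neg hmem]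
      have hpred : List.idxOf? x (zs ++ [x]) = some zs.length := by
        apply List.idxOf?_eq_some_iff.mpr
        refine ⟨by simp, List.getElem_concat_length rfl _, ?_⟩
        intro k hklt
        rw [List.getElem_append_left (by simpa using hklt)]
        exact fun he => hx (he ▸ List.getElem_mem _)
      simp [hpred]

lemma pv_FIdx_values (cn : String) (zones : List String) :
    (pvFIdx cn zones).map (fun j => PySem.List.pyGetD zones j "")
      = (PySem.List.dedup zones).filter (fun z => decide (z ∈ pvCands cn)) := by
  unfold pvFIdx
  rw [List.map_map]
  have h1 : ((fun j : Int => PySem.List.pyGetD zones j "") ∘ Int.ofNat)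
      = fun j : Nat => zones.getD j "" := by
    funext j
    simp [PySem.List.pyGetD_natCast]
  rw [h1]
  have h2 : (List.range zones.length).filter (fun j =>
        decide (List.idxOf? (zones.getD j "") zones = some j) &&
        decide (zones.getD j "" ∈ pvCands cn))
      = ((List.range zones.length).filter (fun j =>
        decide (List.idxOf? (zones.getD j "") zones = some j))).filter (fun j =>
        decide (zones.getD j "" ∈ pvCands cn)) := by
    rw [List.filter_filter]
    apply List.filter_congr
    intro j _
    exact (Bool.and_comm _ _).symm
  rw [h2]
  rw [show (fun j : Nat => decide (zones.getD j "" ∈ pvCands cn))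
      = ((fun z => decide (z ∈ pvCands cn)) ∘ (fun j : Nat => zones.getD j "")) from rfl]
  rw [← List.filter_map, pv_first_map_dedup]

lemma pv_dedup_fold (l : List String) (hl : l.Nodup) (acc : List String) :
    l.foldl (fun a z => if !a.contains z then a ++ [z] else a) acc
      = acc ++ l.filter (fun z => !acc.contains z) := by
  induction l generalizing acc with
  | nil => simp
  | cons z l ih =>
    obtain ⟨hz, hl'⟩ := List.nodup_cons.mp hl
    rw [List.foldl_cons]
    by_cases hmem : z ∈ acc
    · have hcz : acc.contains z = true := by simpa using hmem
      simp only [hcz, Bool.not_true, Bool.false_eq_true, if_false, ih hl',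
        List.filter_cons, Bool.not_true]
    · have hcz : acc.contains z = false := by simpa using hmem
      simp only [hcz, Bool.not_false, if_true, ih hl', List.filter_cons]
      rw [List.append_assoc]
      simp only [List.singleton_append]
      congr 1
      congr 1
      apply List.filter_congr
      intro y hy
      have hyz : y ≠ z := fun he => hz (he ▸ hy)
      simp [List.contains_eq_mem, hyz]

lemma pv_Astep_fold (m : String → Bool) (l : List String) (acc : List String) :
    l.foldl (fun a z => if m z && !a.contains z then a ++ [z] else a) acc
      = acc ++ (PySem.List.dedup l).filter (fun z => m z && !acc.contains z) := by
  induction l generalizing acc with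
  | nil => simp [PySem.List.dedup]
  | cons z l ih =>
    rw [List.foldl_cons, PySem.List.dedup_eq_ofList, PySem.Set.ofList_cons,
      List.filter_cons]
    rw [show (PySem.Set.ofList l).discard z = (PySem.Set.ofList l).filter (fun y => !(y == z))
      from rfl]
    rw [List.filter_filter, ← PySem.List.dedup_eq_ofList]
    by_cases hm : m z
    · by_cases hmem : z ∈ acc
      · have hcz : acc.contains z = true := by simpa using hmem
        simp only [hm, hcz, Bool.not_true, Bool.and_false, Bool.false_eq_true, if_false, ih]
        congr 1
        apply List.filter_congr
        intro y _
        by_cases hyz : y = z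
        · subst hyz; simp; exact fun _ => hmem
        · simp [hyz]
      · have hcz : acc.contains z = false := by simpa using hmem
        simp only [hm, hcz, Bool.not_false, Bool.and_true, if_true, ih, List.append_assoc,
          List.singleton_append]
        congr 1
        congr 1
        apply List.filter_congr
        intro y _
        by_cases hyz : y = z
        · subst hyz; simp [List.contains_eq_mem, hmem]
        · simp [List.contains_eq_mem, hyz, List.mem_append]
    · have hm' : m z = false := by simpa using hm
      simp only [hm', Bool.false_and, Bool.false_eq_true, if_false, ih]
      congr 1
      apply List.filter_congr
      intro y _
      by_cases hyz : y = z
      · subst hyz; simp [hm']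
      · simp [hyz]

lemma pv_per_cn (zones : List String) (cn : String) (acc : List String) :
    zones.foldl (fun a zone =>
        if pvMatchA cn zone && !a.contains zone then a ++ [zone] else a) acc
      = (PySem.List.sorted ((pvCands cn).foldl (pvAppendHit (pvZoneIndex zones)) [])
          (fun j => j)).foldl (fun a j =>
            let z := PySem.List.pyGetD zones j ""
            if !a.contains z then a ++ [z] else a) acc := by
  rw [pv_foldl_filterMap (pvZoneIndex zones) (pvCands cn) [],
    List.nil_append, pv_sorted_hits cn zones]
  rw [show (pvFIdx cn zones).foldl (fun a j =>
        let z := PySem.List.pyGetD zones j ""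
        if !a.contains z then a ++ [z] else a) acc
      = ((pvFIdx cn zones).map (fun j => PySem.List.pyGetD zones j "")).foldl
          (fun a z => if !a.contains z then a ++ [z] else a) acc
    from (List.foldl_map (f := fun j : Int => PySem.List.pyGetD zones j "")
      (g := fun a z => if (!a.contains z) = true then a ++ [z] else a)
      (l := pvFIdx cn zones) (init := acc)).symm]
  rw [pv_FIdx_values cn zones]
  rw [pv_dedup_fold _ (List.Nodup.filter _ (PySem.List.nodup_dedup zones)) acc]
  rw [pv_Astep_fold (pvMatchA cn) zones acc, List.filter_filter]
  congr 1
  apply List.filter_congr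
  intro z _
  have hz : pvMatchA cn z = decide (z ∈ pvCands cn) := by
    by_cases h : z ∈ pvCands cn
    · simp [h, (pv_mem_cands cn z).mp h]
    · simp only [h, decide_false]
      cases hm : pvMatchA cn z
      · rfl
      · exact absurd ((pv_mem_cands cn z).mpr hm) h
  rw [hz, Bool.and_comm]

-- ===== VERDICT (by name: the statement is the Claim_ definition above) =====
theorem get_cert_zones_spec : Claim_equal_get_cert_zones := by
  intro cert zones _
  unfold Spec_get_cert_zones get_cert_zones get_cert_zones_alt
  simp only []
  rw [List.foldl_append]
  have hfold : ∀ (cns : List String) (init : List String),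
      cns.foldl (fun acc cn =>
        zones.foldl (fun acc zone =>
          if pvMatchA cn zone && !acc.contains zone then acc ++ [zone] else acc) acc) init
      = cns.foldl (fun cert_zones cn =>
          (PySem.List.sorted ((pvCands cn).foldl (pvAppendHit (pvZoneIndex zones)) [])
            (fun j => j)).foldl (fun cert_zones j =>
              let z := PySem.List.pyGetD zones j ""
              if !cert_zones.contains z then cert_zones ++ [z] else cert_zones) cert_zones) init :=
    fun cns init => PySem.List.foldl_congr_mem cns _ _ init
      (fun acc cn _ => pv_per_cn zones cn acc)
  cases h1 : cert.lookup "subject_common_names" with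
  | none =>
    cases h2 : cert.lookup "subject_dns_names" with
    | none => simp
    | some cns2 =>
      simp only [Option.getD_some, Option.getD_none, List.foldl_nil]
      exact hfold cns2 []
  | some cns1 =>
    cases h2 : cert.lookup "subject_dns_names" with
    | none =>
      simp only [Option.getD_some, Option.getD_none, List.foldl_nil]
      exact hfold cns1 []
    | some cns2 =>
      simp only [Option.getD_some]
      rw [hfold cns1 [], hfold cns2]
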